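-- pv_equiv track=rewrite | github.com/jaeminSon/problem_solving | foobar/3rd-7.py | solution
-- ===== SOURCE A (Python) =====
-- def solution(start, length):
--
--     def XOR_upto(val):
--         if val < 0:
--             return 0
--         elif (val+1) % 4 == 0:
--             return 0
--         elif (val+1) % 4 == 1:
--             return val
--         elif (val+1) % 4 == 2:
--             return (val-1)^val
--         elif (val+1) % 4 == 3:
--             return (val-2)^(val-1)^val
--
--     res = 0
--     for line in range(length):
--         s = line*length + start
--         e = line*length + start + length - line - 1
--         res ^= (XOR_upto(e) ^ XOR_upto(s-1))
--
--     return res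
-- ===== SOURCE B (Python) =====
-- def solution(start, length):
--     res = 0
--     for line in range(length):
--         first = line * length + start
--         last = first + length - line - 1
--         if first % 2 == 1:          # odd first cell: take it alone, align to even
--             res ^= first
--             first += 1
--         count = (last - first + 1) // 2     # full (even, odd) pairs, each XORs to 1
--         if (last - first + 1) % 2 == 1:     # leftover single even cell
--             res ^= last
--         res ^= count % 2
--     return res
-- ===== Notes on version B (the rewrite author's own statement) =====
-- stated objective: alternative
-- what changed: B drops A's XOR_upto prefix-XOR helper with its mod-4 closed-form table and instead XORs each row's run directly in O(1) by pair-parity: an odd first cell is taken alone, each aligned (even,odd) pair XORs to 1, plus a possible leftover even cell.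
-- outside the precondition, e.g. on solution(-5, 2): A returns 0, B returns -6
import Mathlib
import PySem

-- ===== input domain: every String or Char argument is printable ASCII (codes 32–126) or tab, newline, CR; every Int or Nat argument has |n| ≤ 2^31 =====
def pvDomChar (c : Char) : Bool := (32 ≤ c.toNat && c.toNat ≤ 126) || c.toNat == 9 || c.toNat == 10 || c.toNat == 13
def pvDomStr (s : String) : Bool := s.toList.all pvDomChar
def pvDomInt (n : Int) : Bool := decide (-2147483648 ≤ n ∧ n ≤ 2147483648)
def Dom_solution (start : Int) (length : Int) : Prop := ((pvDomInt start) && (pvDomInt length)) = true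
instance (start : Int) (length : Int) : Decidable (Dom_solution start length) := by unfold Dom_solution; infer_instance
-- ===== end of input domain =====

-- B drops A's prefix-XOR helper (mod-4 closed-form table) and XORs each row's run directly
-- in O(1) by pair-parity; Pre_ excludes negative start (see the comment at Pre_solution).

-- ===== PORT A =====
-- A's inner helper XOR_upto; the final 'elif (val+1)%4 == 3' is exhaustive for val ≥ 0
-- (the only way past the earlier branches), so it is ported as the trailing else.
def xorUpto (val : Int) : Int :=
  if val < 0 then 0
  else if PySem.Int.mod (val + 1) 4 = 0 then 0
  else if PySem.Int.mod (val + 1) 4 = 1 then val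
  else if PySem.Int.mod (val + 1) 4 = 2 then PySem.Int.bxor (val - 1) val
  else PySem.Int.bxor (PySem.Int.bxor (val - 2) (val - 1)) val

def solution (start : Int) (length : Int) : Int :=
  (PySem.List.pyRange 0 length 1).foldl
    (fun res line =>
      let s := line * length + start
      let e := line * length + start + length - line - 1
      PySem.Int.bxor res (PySem.Int.bxor (xorUpto e) (xorUpto (s - 1)))) 0

-- ===== PORT B =====
-- per line: XOR the run first..last in O(1) — an odd first cell is taken alone, the
-- remaining even-aligned run splits into (even,odd) pairs each XORing to 1, plus a
-- possible leftover even cell.  'res'/'first' reassignments become shadowing lets.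
def solution_alt (start : Int) (length : Int) : Int :=
  (PySem.List.pyRange 0 length 1).foldl
    (fun res line =>
      let first := line * length + start
      let last := first + length - line - 1
      let res1 := if PySem.Int.mod first 2 = 1 then PySem.Int.bxor res first else res
      let first1 := if PySem.Int.mod first 2 = 1 then first + 1 else first
      let count := PySem.Int.floordiv (last - first1 + 1) 2
      let res2 := if PySem.Int.mod (last - first1 + 1) 2 = 1 then PySem.Int.bxor res1 last else res1
      PySem.Int.bxor res2 (PySem.Int.mod count 2)) 0

-- ===== PRECONDITION & SPEC =====
-- Pre_ excludes negative start, on which the block's cell values are negative and the two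
-- behaviours are both artefacts of an unspecified corner: A's XOR_upto treats the negative
-- prefix as empty (returns 0 below 0) while B XORs the actual negative cell values.
def Pre_solution (start : Int) (length : Int) : Prop := 0 ≤ start
instance (start : Int) (length : Int) : Decidable (Pre_solution start length) := by unfold Pre_solution; infer_instance
def pvWitness_solution : Int × Int := (7, 3)

def Spec_solution (start : Int) (length : Int) (out : Int) : Prop := out = solution_alt start length
instance (start : Int) (length : Int) (out : Int) : Decidable (Spec_solution start length out) := by unfold Spec_solution; infer_instance

-- ===== CLAIM (what is proved, stated in full; the proofs are below) =====
def Claim_equal_solution : Prop := ∀ (start : Int) (length : Int), Dom_solution start length → Pre_solution start length → Spec_solution start length (solution start length)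

-- ===== LEMMAS AND PROOFS =====

-- xor of 0,1,…,n-1 over ℕ
def natXorUpto (n : ℕ) : ℕ := (List.range n).foldl (· ^^^ ·) 0

theorem natXorUpto_succ (n : ℕ) : natXorUpto (n + 1) = natXorUpto n ^^^ n := by
  simp [natXorUpto, List.range_succ]

-- the four consecutive values 4q, 4q+1, 4q+2, 4q+3 xor to 0
theorem four_block (q : ℕ) : ((4 * q) ^^^ (4 * q + 1)) ^^^ (4 * q + 2) ^^^ (4 * q + 3) = 0 := by
  apply Nat.eq_of_testBit_eq
  intro i
  have h : ∀ r : ℕ, r < 4 → Nat.testBit (4 * q + r) i =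
      if i < 2 then Nat.testBit r i else Nat.testBit q (i - 2) := by
    intro r hr
    have h4 : 4 * q + r = 2 ^ 2 * q + r := by ring_nf
    rw [h4, Nat.testBit_two_pow_mul_add q (show r < 2 ^ 2 by omega) i]
  simp only [Nat.testBit_xor, Nat.zero_testBit]
  rw [show 4 * q = 4 * q + 0 by omega]
  rw [h 0 (by omega), h 1 (by omega), h 2 (by omega), h 3 (by omega)]
  by_cases hi : i < 2
  · simp only [hi, if_pos]
    interval_cases i <;> decide
  · simp only [hi, if_false]
    cases Nat.testBit q (i - 2) <;> rfl

theorem natXorUpto_four_mul (q : ℕ) : natXorUpto (4 * q) = 0 := by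
  induction q with
  | zero => rfl
  | succ q ih =>
    have e : 4 * (q + 1) = (((4 * q) + 1) + 1) + 1 + 1 := by omega
    rw [e, natXorUpto_succ, natXorUpto_succ, natXorUpto_succ, natXorUpto_succ, ih]
    have := four_block q
    calc ((((0 ^^^ (4 * q)) ^^^ (4 * q + 1)) ^^^ (4 * q + 2)) ^^^ (4 * q + 3))
        = (((4 * q) ^^^ (4 * q + 1)) ^^^ (4 * q + 2)) ^^^ (4 * q + 3) := by
          rw [Nat.zero_xor]
      _ = 0 := this

-- Int/Nat bridges for the closed form: for n : ℕ, xorUpto n = natXorUpto (n+1)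
theorem mod_natCast (a : ℕ) : PySem.Int.mod ((a : ℤ)) 4 = ((a % 4 : ℕ) : ℤ) := by
  simp [PySem.Int.mod, Int.fmod_eq_emod]

theorem mod_cond (n : ℕ) : PySem.Int.mod ((n : ℤ) + 1) 4 = (((n + 1) % 4 : ℕ) : ℤ) := by
  rw [show ((n : ℤ) + 1) = ((n + 1 : ℕ) : ℤ) by push_cast; ring, mod_natCast]

theorem xorUpto_natCast (n : ℕ) : xorUpto (n : ℤ) = (natXorUpto (n + 1) : ℤ) := by
  unfold xorUpto
  rw [if_neg (by omega), mod_cond]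
  have hr : n % 4 = 0 ∨ n % 4 = 1 ∨ n % 4 = 2 ∨ n % 4 = 3 := by omega
  rcases hr with h | h | h | h
  · -- n = 4q : (n+1)%4 = 1, value n; natXorUpto (n+1) = natXorUpto n ^^^ n = n
    obtain ⟨q, rfl⟩ : ∃ q, n = 4 * q := ⟨n / 4, by omega⟩
    rw [if_neg (by norm_cast; omega), if_pos (by norm_cast; omega)]
    rw [natXorUpto_succ, natXorUpto_four_mul, Nat.zero_xor]
  · -- n = 4q+1 : value (n-1)^^^n
    obtain ⟨q, rfl⟩ : ∃ q, n = 4 * q + 1 := ⟨n / 4, by omega⟩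
    rw [if_neg (by norm_cast; omega), if_neg (by norm_cast; omega), if_pos (by norm_cast; omega)]
    rw [natXorUpto_succ, natXorUpto_succ, natXorUpto_four_mul, Nat.zero_xor]
    rw [show ((4 * q + 1 : ℕ) : ℤ) - 1 = ((4 * q : ℕ) : ℤ) by push_cast; ring]
    rw [PySem.Int.bxor_natCast]
  · -- n = 4q+2 : value ((n-2)^^^(n-1))^^^n
    obtain ⟨q, rfl⟩ : ∃ q, n = 4 * q + 2 := ⟨n / 4, by omega⟩
    rw [if_neg (by norm_cast; omega), if_neg (by norm_cast; omega), if_neg (by norm_cast; omega)]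
    rw [natXorUpto_succ, natXorUpto_succ, natXorUpto_succ, natXorUpto_four_mul, Nat.zero_xor]
    rw [show ((4 * q + 2 : ℕ) : ℤ) - 2 = ((4 * q : ℕ) : ℤ) by push_cast; ring]
    rw [show ((4 * q + 2 : ℕ) : ℤ) - 1 = ((4 * q + 1 : ℕ) : ℤ) by push_cast; ring]
    rw [PySem.Int.bxor_natCast, PySem.Int.bxor_natCast]
  · -- n = 4q+3 : value 0; natXorUpto (n+1) = natXorUpto (4(q+1)) = 0
    obtain ⟨q, rfl⟩ : ∃ q, n = 4 * q + 3 := ⟨n / 4, by omega⟩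
    rw [if_pos (by norm_cast; omega)]
    rw [show 4 * q + 3 + 1 = 4 * (q + 1) by omega, natXorUpto_four_mul]
    norm_num

theorem xorUpto_natCast_sub_one (s : ℕ) : xorUpto ((s : ℤ) - 1) = (natXorUpto s : ℤ) := by
  cases s with
  | zero => rfl
  | succ s =>
    rw [show ((s + 1 : ℕ) : ℤ) - 1 = ((s : ℕ) : ℤ) by push_cast; ring]
    exact xorUpto_natCast s

-- an even number followed by its successor XOR to 1
theorem even_xor_succ (x : ℕ) (hx : x % 2 = 0) : x ^^^ (x + 1) = 1 := by
  obtain ⟨m, rfl⟩ : ∃ m, x = 2 * m := ⟨x / 2, by omega⟩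
  apply Nat.eq_of_testBit_eq
  intro i
  have h : ∀ r : ℕ, r < 2 → Nat.testBit (2 * m + r) i =
      if i < 1 then Nat.testBit r i else Nat.testBit m (i - 1) := by
    intro r hr
    have h2 : 2 * m + r = 2 ^ 1 * m + r := by ring_nf
    rw [h2, Nat.testBit_two_pow_mul_add m (show r < 2 ^ 1 by omega) i]
  rw [Nat.testBit_xor, show 2 * m = 2 * m + 0 by omega, h 0 (by omega), h 1 (by omega)]
  by_cases hi : i < 1
  · interval_cases i
    simp
  · simp only [hi, if_false]
    rw [Bool.xor_self]
    symm
    rw [← Bool.not_eq_true, Nat.testBit_one_eq_true_iff_self_eq_zero]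
    omega

-- xor of an even-aligned run of 2n consecutive numbers is n % 2
theorem natSeg_even (a n : ℕ) (ha : a % 2 = 0) :
    natXorUpto (a + 2 * n) = natXorUpto a ^^^ n % 2 := by
  induction n with
  | zero => simp
  | succ n ih =>
    rw [show a + 2 * (n + 1) = ((a + 2 * n) + 1) + 1 by omega,
        natXorUpto_succ, natXorUpto_succ, ih]
    have h1 : (a + 2 * n) ^^^ (a + 2 * n + 1) = 1 := even_xor_succ _ (by omega)
    calc ((natXorUpto a ^^^ n % 2) ^^^ (a + 2 * n)) ^^^ (a + 2 * n + 1)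
        = (natXorUpto a ^^^ n % 2) ^^^ ((a + 2 * n) ^^^ (a + 2 * n + 1)) := by
          rw [Nat.xor_assoc]
      _ = (natXorUpto a ^^^ n % 2) ^^^ 1 := by rw [h1]
      _ = natXorUpto a ^^^ (n % 2 ^^^ 1) := by rw [Nat.xor_assoc]
      _ = natXorUpto a ^^^ (n + 1) % 2 := by
          congr 1
          rcases Nat.mod_two_eq_zero_or_one n with h | h
          · rw [h, show (0 : ℕ) ^^^ 1 = 1 by decide]
            omega
          · rw [h, show (1 : ℕ) ^^^ 1 = 0 by decide]
            omega

theorem xor_chop (x y : ℕ) : (x ^^^ y) ^^^ x = y := by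
  rw [Nat.xor_comm x y, Nat.xor_assoc, Nat.xor_self, Nat.xor_zero]

theorem xor_chop' (x y z : ℕ) : ((x ^^^ y) ^^^ z) ^^^ x = y ^^^ z := by
  rw [Nat.xor_assoc x y z, xor_chop]

theorem xor_chop3 (x y z w : ℕ) : (((x ^^^ y) ^^^ z) ^^^ w) ^^^ x = (y ^^^ z) ^^^ w := by
  rw [Nat.xor_assoc x y z, Nat.xor_assoc x (y ^^^ z) w, xor_chop]

-- ℤ/ℕ bridges for % 2 and // 2 on nonnegative values
theorem mod2_natCast (a : ℕ) : PySem.Int.mod ((a : ℤ)) 2 = ((a % 2 : ℕ) : ℤ) := by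
  simp [PySem.Int.mod, Int.fmod_eq_emod]

theorem floordiv2_natCast (a : ℕ) : PySem.Int.floordiv ((a : ℤ)) 2 = ((a / 2 : ℕ) : ℤ) := by
  simp [PySem.Int.floordiv, Int.fdiv_eq_ediv]

-- the O(1) body of B on one line equals xor-ing the whole run first..last
theorem lineB (a m r : ℕ) (hm : 1 ≤ m) :
    (let first : ℤ := (a : ℤ)
     let last : ℤ := ((a + m - 1 : ℕ) : ℤ)
     let res1 := if PySem.Int.mod first 2 = 1 then PySem.Int.bxor (r : ℤ) first else (r : ℤ)
     let first1 := if PySem.Int.mod first 2 = 1 then first + 1 else first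
     let count := PySem.Int.floordiv (last - first1 + 1) 2
     let res2 := if PySem.Int.mod (last - first1 + 1) 2 = 1 then PySem.Int.bxor res1 last else res1
     PySem.Int.bxor res2 (PySem.Int.mod count 2))
    = ((r ^^^ (natXorUpto (a + m) ^^^ natXorUpto a) : ℕ) : ℤ) := by
  by_cases ha : a % 2 = 1
  · -- odd first cell taken alone; the rest is the even-aligned run (a+1)..(a+m-1)
    have hc1 : PySem.Int.mod ((a : ℤ)) 2 = 1 := by rw [mod2_natCast, ha]; norm_cast
    show PySem.Int.bxor
        (if PySem.Int.mod (((a + m - 1 : ℕ) : ℤ) - (if PySem.Int.mod ((a : ℤ)) 2 = 1 then (a : ℤ) + 1 else (a : ℤ)) + 1) 2 = 1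
          then PySem.Int.bxor (if PySem.Int.mod ((a : ℤ)) 2 = 1 then PySem.Int.bxor (r : ℤ) (a : ℤ) else (r : ℤ)) ((a + m - 1 : ℕ) : ℤ)
          else (if PySem.Int.mod ((a : ℤ)) 2 = 1 then PySem.Int.bxor (r : ℤ) (a : ℤ) else (r : ℤ)))
        (PySem.Int.mod (PySem.Int.floordiv (((a + m - 1 : ℕ) : ℤ) - (if PySem.Int.mod ((a : ℤ)) 2 = 1 then (a : ℤ) + 1 else (a : ℤ)) + 1) 2) 2) = _
    rw [if_pos hc1, if_pos hc1]
    rw [show ((a + m - 1 : ℕ) : ℤ) - ((a : ℤ) + 1) + 1 = ((m - 1 : ℕ) : ℤ) by omega]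
    rw [floordiv2_natCast, mod2_natCast, mod2_natCast, PySem.Int.bxor_natCast]
    by_cases hodd : (m - 1) % 2 = 1
    · have hc2 : (((m - 1) % 2 : ℕ) : ℤ) = 1 := by rw [hodd]; norm_cast
      rw [if_pos hc2, PySem.Int.bxor_natCast, PySem.Int.bxor_natCast]
      rw [Nat.cast_inj]
      rw [show a + m = ((a + 1) + 2 * ((m - 1) / 2)) + 1 by omega, Nat.add_sub_cancel,
          natXorUpto_succ, natSeg_even (a + 1) ((m - 1) / 2) (by omega), natXorUpto_succ,
          xor_chop3]
      ac_rfl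
    · have hc2 : ¬ ((((m - 1) % 2 : ℕ) : ℤ) = 1) := by
        intro h
        exact hodd (by exact_mod_cast h)
      rw [if_neg hc2, PySem.Int.bxor_natCast]
      rw [Nat.cast_inj]
      rw [show a + m = (a + 1) + 2 * ((m - 1) / 2) by omega,
          natSeg_even (a + 1) ((m - 1) / 2) (by omega), natXorUpto_succ, xor_chop']
      ac_rfl
  · -- even first cell: pairs a..(a+m-1), possibly one leftover even cell
    have ha0 : a % 2 = 0 := by omega
    have hc1 : ¬ (PySem.Int.mod ((a : ℤ)) 2 = 1) := by
      rw [mod2_natCast, ha0]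
      intro h
      norm_cast at h
    show PySem.Int.bxor
        (if PySem.Int.mod (((a + m - 1 : ℕ) : ℤ) - (if PySem.Int.mod ((a : ℤ)) 2 = 1 then (a : ℤ) + 1 else (a : ℤ)) + 1) 2 = 1
          then PySem.Int.bxor (if PySem.Int.mod ((a : ℤ)) 2 = 1 then PySem.Int.bxor (r : ℤ) (a : ℤ) else (r : ℤ)) ((a + m - 1 : ℕ) : ℤ)
          else (if PySem.Int.mod ((a : ℤ)) 2 = 1 then PySem.Int.bxor (r : ℤ) (a : ℤ) else (r : ℤ)))
        (PySem.Int.mod (PySem.Int.floordiv (((a + m - 1 : ℕ) : ℤ) - (if PySem.Int.mod ((a : ℤ)) 2 = 1 then (a : ℤ) + 1 else (a : ℤ)) + 1) 2) 2) = _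
    rw [if_neg hc1, if_neg hc1]
    rw [show ((a + m - 1 : ℕ) : ℤ) - (a : ℤ) + 1 = ((m : ℕ) : ℤ) by omega]
    rw [floordiv2_natCast, mod2_natCast, mod2_natCast]
    by_cases hodd : m % 2 = 1
    · have hc2 : ((m % 2 : ℕ) : ℤ) = 1 := by rw [hodd]; norm_cast
      rw [if_pos hc2, PySem.Int.bxor_natCast, PySem.Int.bxor_natCast]
      rw [Nat.cast_inj]
      rw [show a + m = (a + 2 * (m / 2)) + 1 by omega, Nat.add_sub_cancel,
          natXorUpto_succ, natSeg_even a (m / 2) ha0, xor_chop']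
      ac_rfl
    · have hc2 : ¬ (((m % 2 : ℕ) : ℤ) = 1) := by
        intro h
        exact hodd (by exact_mod_cast h)
      rw [if_neg hc2, PySem.Int.bxor_natCast]
      rw [Nat.cast_inj]
      rw [show a + m = a + 2 * (m / 2) by omega, natSeg_even a (m / 2) ha0, xor_chop]

-- generic cast lemma: a fold over the ℤ-cast of a list of ℕ that agrees with a ℕ fold
theorem foldl_cast (fI : ℤ → ℤ → ℤ) (fN : ℕ → ℕ → ℕ) (ks : List ℕ)
    (h : ∀ r : ℕ, ∀ k ∈ ks, fI (r : ℤ) (k : ℤ) = (fN r k : ℤ)) (r : ℕ) :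
    (ks.map (fun k : ℕ => (k : ℤ))).foldl fI (r : ℤ) = ((ks.foldl fN r : ℕ) : ℤ) := by
  induction ks generalizing r with
  | nil => rfl
  | cons k ks ih =>
    rw [List.map_cons, List.foldl_cons, List.foldl_cons, h r k (List.mem_cons_self ..)]
    exact ih (fun r k hk => h r k (List.mem_cons_of_mem _ hk)) (fN r k)

-- ===== VERDICT (by name: the statement is the Claim_ definition above) =====
theorem solution_spec : Claim_equal_solution := by
  unfold Claim_equal_solution
  intro start length _ hpre
  unfold Spec_solution solution solution_alt
  obtain ⟨S, rfl⟩ : ∃ s : ℕ, start = (s : ℤ) := ⟨start.toNat, by unfold Pre_solution at hpre; omega⟩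
  rw [PySem.List.pyRange_one]
  simp only [sub_zero, zero_add]
  refine (foldl_cast _ (fun res k => res ^^^ (natXorUpto (k * length.toNat + S + (length.toNat - k)) ^^^ natXorUpto (k * length.toNat + S))) _ ?hA 0).trans
    (Eq.trans ?mid (foldl_cast _ (fun res k => res ^^^ (natXorUpto (k * length.toNat + S + (length.toNat - k)) ^^^ natXorUpto (k * length.toNat + S))) _ ?hB 0).symm)
  case mid => rfl
  case hA =>
    intro r k hk
    have hkL : k < length.toNat := List.mem_range.mp hk
    have hlen : length = (length.toNat : ℤ) := by omega
    rw [hlen]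
    simp only [Int.toNat_natCast]
    set L := length.toNat with hLdef
    show PySem.Int.bxor (r : ℤ)
        (PySem.Int.bxor (xorUpto ((k : ℤ) * L + S + L - k - 1)) (xorUpto ((k : ℤ) * L + S - 1))) = _
    rw [show ((k : ℤ) * L + S + L - k - 1) = ((k * L + S + (L - k) - 1 : ℕ) : ℤ) by omega]
    rw [show ((k : ℤ) * L + S - 1) = ((k * L + S : ℕ) : ℤ) - 1 by push_cast; ring]
    rw [xorUpto_natCast, xorUpto_natCast_sub_one]
    rw [show k * L + S + (L - k) - 1 + 1 = k * L + S + (L - k) by omega]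
    rw [PySem.Int.bxor_natCast, PySem.Int.bxor_natCast]
  case hB =>
    intro r k hk
    have hkL : k < length.toNat := List.mem_range.mp hk
    have hlen : length = (length.toNat : ℤ) := by omega
    rw [hlen]
    simp only [Int.toNat_natCast]
    set L := length.toNat with hLdef
    rw [show ((k : ℤ) * L + S) = ((k * L + S : ℕ) : ℤ) by push_cast; ring]
    rw [show ((k * L + S : ℕ) : ℤ) + L - k - 1 = ((k * L + S + (L - k) - 1 : ℕ) : ℤ) by omega]
    exact lineB (k * L + S) (L - k) r (by omega)
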